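-- pv_equiv track=rewrite | github.com/nithya1136/Leetcode | 476-Number-Complement.py | result
-- ===== SOURCE A (Python) =====
-- def result(a):
--     n=0
--     j=0
--     while(a):
--         i=a%10
--         n=n+pow(2,j)*i
--         j+=1
--         a=a//10
--     return n
-- ===== SOURCE B (Python) =====
-- def result(a):
--     n = 0
--     for ch in str(a):
--         n = n * 2 + int(ch)
--     return n
-- ===== Notes on version B (the rewrite author's own statement) =====
-- stated objective: simpler
-- what changed: Replaces the while-loop that peels least-significant decimal digits and weights them with an explicit pow(2,j) counter by a single Horner pass (n = n*2 + digit) over the decimal string, most-significant digit first.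
import Mathlib
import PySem

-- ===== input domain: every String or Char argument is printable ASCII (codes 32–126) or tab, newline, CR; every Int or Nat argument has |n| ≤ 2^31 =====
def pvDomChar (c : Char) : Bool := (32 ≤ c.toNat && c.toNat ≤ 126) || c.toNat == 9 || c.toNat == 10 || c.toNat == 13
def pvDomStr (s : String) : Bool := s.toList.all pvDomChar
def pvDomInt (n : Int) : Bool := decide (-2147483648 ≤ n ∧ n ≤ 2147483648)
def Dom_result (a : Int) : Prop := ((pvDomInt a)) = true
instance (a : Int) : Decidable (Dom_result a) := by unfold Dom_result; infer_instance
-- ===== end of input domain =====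

-- B replaces A's LSB-first digit loop with its pow(2,j) counter by a single
-- Horner pass over str(a); same value on every non-negative int (A diverges on
-- negative ints, B raises ValueError there — both outside Pre_).

-- ===== PORT A =====
-- Python: while(a): i=a%10; n=n+pow(2,j)*i; j+=1; a=a//10.  The '0 < a' guard
-- (instead of Python's 'a != 0') only makes the loop total: for a < 0 the
-- Python loop never terminates, so nothing is claimed there (Pre_result).
def resultLoop (a n j : Int) : Int :=
  if h : 0 < a then
    resultLoop (PySem.Int.floordiv a 10) (n + 2 ^ j.toNat * PySem.Int.mod a 10) (j + 1)
  else n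
termination_by a.toNat
decreasing_by
  rw [PySem.Int.floordiv_eq_ediv_of_pos (by norm_num)]
  omega

def result (a : Int) : Int := resultLoop a 0 0

-- ===== PORT B =====
-- Python: n = 0; for ch in str(a): n = n*2 + int(ch); return n.
-- int(ch) is ported as ch.toNat - 48, exact for the digit characters str(a)
-- yields on the admitted (non-negative) inputs.
def result_alt (a : Int) : Int :=
  (PySem.Int.toStr a).toList.foldl (fun n c => n * 2 + ((c.toNat : Int) - 48)) 0

-- ===== PRECONDITION & SPEC =====
-- Pre_ excludes negative ints: there the Python A never returns (infinite loop)
-- and the Python B raises ValueError on the '-' character.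
def Pre_result (a : Int) : Prop := 0 ≤ a
instance (a : Int) : Decidable (Pre_result a) := by unfold Pre_result; infer_instance
def pvWitness_result : Int := 101

def Spec_result (a : Int) (out : Int) : Prop := out = result_alt a
instance (a : Int) (out : Int) : Decidable (Spec_result a out) := by unfold Spec_result; infer_instance

-- ===== CLAIM (what is proved, stated in full; the proofs are below) =====
def Claim_equal_result : Prop := ∀ (a : Int), Dom_result a → Pre_result a → Spec_result a (result a)

-- ===== LEMMAS AND PROOFS =====

-- The common mathematical value: decimal digits of m read as binary digits.
def gval (m : Nat) : Int :=
  if m = 0 then 0 else 2 * gval (m / 10) + ((m % 10 : Nat) : Int)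
termination_by m
decreasing_by exact Nat.div_lt_self (by omega) (by norm_num)

lemma toDigitsCore_acc (b fuel : Nat) :
    ∀ (n : Nat) (ds : List Char),
      Nat.toDigitsCore b fuel n ds = Nat.toDigitsCore b fuel n [] ++ ds := by
  induction fuel with
  | zero => intro n ds; simp [Nat.toDigitsCore]
  | succ f ih =>
    intro n ds
    simp only [Nat.toDigitsCore]
    by_cases h : n / b = 0
    · simp [h]
    · simp only [h]
      rw [ih (n / b) ((n % b).digitChar :: ds), ih (n / b) [(n % b).digitChar]]
      simp

lemma toDigitsCore_fuel (f1 : Nat) :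
    ∀ (f2 n : Nat), n < f1 → n < f2 →
      Nat.toDigitsCore 10 f1 n [] = Nat.toDigitsCore 10 f2 n [] := by
  induction f1 with
  | zero => intro f2 n h1 _; omega
  | succ s ih =>
    intro f2 n h1 h2
    cases f2 with
    | zero => omega
    | succ t =>
      simp only [Nat.toDigitsCore]
      by_cases h : n / 10 = 0
      · simp [h]
      · simp only [h]
        rw [toDigitsCore_acc, toDigitsCore_acc 10 t]
        have hlt : n / 10 < n := Nat.div_lt_self (by omega) (by norm_num)
        rw [ih t (n / 10) (by omega) (by omega)]

lemma toDigits10_lt (m : Nat) (h : m < 10) :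
    Nat.toDigits 10 m = [Nat.digitChar m] := by
  simp [Nat.toDigits, Nat.toDigitsCore, Nat.div_eq_of_lt h, Nat.mod_eq_of_lt h]

lemma toDigitsCore_step (m : Nat) (h0 : m / 10 ≠ 0) :
    Nat.toDigitsCore 10 (m + 1) m [] = Nat.toDigitsCore 10 m (m / 10) [(m % 10).digitChar] := by
  conv_lhs => rw [Nat.toDigitsCore]
  simp [h0]

lemma gval_pos (m : Nat) (h0 : m ≠ 0) :
    gval m = 2 * gval (m / 10) + ((m % 10 : Nat) : Int) := by
  rw [gval, if_neg h0]

lemma toDigits10_ge (m : Nat) (h : 10 ≤ m) :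
    Nat.toDigits 10 m = Nat.toDigits 10 (m / 10) ++ [Nat.digitChar (m % 10)] := by
  have h0 : m / 10 ≠ 0 := by intro hc; omega
  have hlt : m / 10 < m := Nat.div_lt_self (by omega) (by norm_num)
  simp only [Nat.toDigits]
  rw [toDigitsCore_step m h0, toDigitsCore_acc,
      toDigitsCore_fuel m (m / 10 + 1) (m / 10) (by omega) (by omega)]

lemma digitChar_toNat (d : Nat) (h : d < 10) :
    ((Nat.digitChar d).toNat : Int) = 48 + d := by
  interval_cases d <;> decide

lemma horner_toDigits (m : Nat) :
    (Nat.toDigits 10 m).foldl (fun n c => n * 2 + ((c.toNat : Int) - 48)) 0 = gval m := by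
  induction m using Nat.strong_induction_on with
  | _ m ih =>
    by_cases h : m < 10
    · rw [toDigits10_lt m h]
      simp only [List.foldl_cons, List.foldl_nil]
      rw [digitChar_toNat m h]
      by_cases h0 : m = 0
      · simp [h0, gval]
      · rw [gval_pos m h0, Nat.div_eq_of_lt h, Nat.mod_eq_of_lt h]
        simp [gval]
    · rw [toDigits10_ge m (by omega), List.foldl_append]
      simp only [List.foldl_cons, List.foldl_nil]
      rw [ih (m / 10) (Nat.div_lt_self (by omega) (by norm_num)),
          digitChar_toNat (m % 10) (Nat.mod_lt m (by norm_num)),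
          gval_pos m (by omega)]
      push_cast
      ring

lemma resultLoop_eq (m : Nat) :
    ∀ (n j : Int), 0 ≤ j → resultLoop (m : Int) n j = n + 2 ^ j.toNat * gval m := by
  induction m using Nat.strong_induction_on with
  | _ m ih =>
    intro n j hj
    rw [resultLoop]
    by_cases h0 : m = 0
    · subst h0
      simp [gval]
    · have hpos : (0 : Int) < (m : Int) := by exact_mod_cast Nat.pos_of_ne_zero h0
      rw [dif_pos hpos]
      have hfd : PySem.Int.floordiv (m : Int) 10 = ((m / 10 : Nat) : Int) := by
        exact_mod_cast PySem.Int.floordiv_natCast m 10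
      have hmd : PySem.Int.mod (m : Int) 10 = ((m % 10 : Nat) : Int) := by
        exact_mod_cast PySem.Int.mod_natCast m 10
      rw [hfd, hmd, ih (m / 10) (Nat.div_lt_self (Nat.pos_of_ne_zero h0) (by norm_num)) _ (j + 1) (by omega)]
      have ht : (j + 1).toNat = j.toNat + 1 := by omega
      rw [ht, gval_pos m h0]
      ring

-- ===== VERDICT (by name: the statement is the Claim_ definition above) =====
theorem result_spec : Claim_equal_result := by
  intro a _ hpre
  replace hpre : 0 ≤ a := hpre
  unfold Spec_result result result_alt
  rw [PySem.Int.toList_toStr]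
  have ha : a = ((a.toNat : Nat) : Int) := by omega
  rw [ha]
  rw [resultLoop_eq a.toNat 0 0 (by omega)]
  simp only [PySem.Int.toChars]
  rw [if_neg (by omega : ¬ ((a.toNat : Int) < 0))]
  rw [Int.toNat_natCast, horner_toDigits]
  simp
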